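-- pv_equiv track=rewrite | github.com/njacquemin1993/3dMaker | imageTo3d.py | sort_and_clean
-- ===== SOURCE A (Python) =====
-- def sort_and_clean(data):
--     dic = {}
--     for x in data:
--         if x[2] not in dic:
--             dic[x[2]] = x
--     data = [dic[x] for x in dic]
--     data = sorted(data, key=lambda x: x[2])
--     return data
-- ===== SOURCE B (Python) =====
-- def sort_and_clean(data):
--     out = []
--     prev = None
--     for x in sorted(data, key=lambda x: x[2]):
--         if prev is None:
--             out.append(x)
--             prev = x[2]
--         elif x[2] != prev:
--             out.append(x)
--             prev = x[2]
--     return out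
-- ===== Notes on version B (the rewrite author's own statement) =====
-- stated objective: simpler
-- what changed: Instead of building a dict of first occurrences per third element and then sorting its values, B stably sorts the whole list by the third element once and makes a single pass keeping only the first element of each equal-key run (stability makes that the earliest original occurrence).
import Mathlib
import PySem

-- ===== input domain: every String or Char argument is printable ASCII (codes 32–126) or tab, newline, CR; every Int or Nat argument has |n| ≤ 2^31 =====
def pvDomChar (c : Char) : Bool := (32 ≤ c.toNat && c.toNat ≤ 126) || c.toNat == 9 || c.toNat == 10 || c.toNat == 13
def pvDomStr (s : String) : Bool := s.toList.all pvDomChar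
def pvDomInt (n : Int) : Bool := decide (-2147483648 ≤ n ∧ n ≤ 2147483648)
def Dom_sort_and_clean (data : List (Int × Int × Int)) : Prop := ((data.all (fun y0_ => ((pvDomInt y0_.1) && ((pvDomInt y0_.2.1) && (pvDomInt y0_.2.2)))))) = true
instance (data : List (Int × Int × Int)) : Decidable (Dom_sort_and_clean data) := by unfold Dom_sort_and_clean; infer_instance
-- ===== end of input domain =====

-- B replaces A's dict-of-first-occurrences + sort-of-values by one stable sort followed by a
-- single pass keeping the first element of each equal-key run (objective: simpler).


-- ===== PORT A =====
-- dic = {}; for x in data: if x[2] not in dic: dic[x[2]] = x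
-- data = [dic[x] for x in dic]  (dic[x] always succeeds here, so getD's default is never used)
-- return sorted(data, key=lambda x: x[2])
def sort_and_clean (data : List (Int × Int × Int)) : List (Int × Int × Int) :=
  let dic : PySem.Dict Int (Int × Int × Int) :=
    data.foldl (fun dic x => if dic.contains x.2.2 then dic else dic.insert x.2.2 x) PySem.Dict.empty
  let data2 := (PySem.Dict.keys dic).map (fun k => PySem.Dict.getD dic k (0, 0, 0))
  PySem.List.sorted data2 (fun x => x.2.2)

-- ===== PORT B =====
-- out = []; prev = None
-- for x in sorted(data, key=lambda x: x[2]): keep x when prev is None or x[2] != prev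
def sort_and_clean_alt (data : List (Int × Int × Int)) : List (Int × Int × Int) :=
  ((PySem.List.sorted data (fun x => x.2.2)).foldl
    (fun (acc : List (Int × Int × Int) × Option Int) x =>
      match acc.2 with
      | none => (acc.1 ++ [x], some x.2.2)
      | some p => if x.2.2 ≠ p then (acc.1 ++ [x], some x.2.2) else acc)
    ([], none)).1

-- ===== PRECONDITION & SPEC =====
def Spec_sort_and_clean (data : List (Int × Int × Int)) (out : List (Int × Int × Int)) : Prop := out = sort_and_clean_alt data
instance (data : List (Int × Int × Int)) (out : List (Int × Int × Int)) : Decidable (Spec_sort_and_clean data out) := by unfold Spec_sort_and_clean; infer_instance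

-- ===== CLAIM =====
def Claim_equal_sort_and_clean : Prop := ∀ (data : List (Int × Int × Int)), Dom_sort_and_clean data → Spec_sort_and_clean data (sort_and_clean data)

-- ===== LEMMAS AND PROOFS =====

-- the list of first occurrences per third component, in original order
def pvFirsts : List (Int × Int × Int) → List (Int × Int × Int)
  | [] => []
  | x :: xs => x :: pvFirsts (xs.filter (fun y => y.2.2 ≠ x.2.2))
termination_by xs => xs.length
decreasing_by simpa using Nat.lt_succ_of_le ((List.length_filter_le _ _).trans (by simp))

-- induction principle following pvFirsts' recursion
theorem pvFirsts_induction {motive : List (Int × Int × Int) → Prop} (h1 : motive [])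
    (h2 : ∀ x xs, motive (xs.filter (fun y => y.2.2 ≠ x.2.2)) → motive (x :: xs)) :
    ∀ xs, motive xs
  | [] => h1
  | x :: xs => h2 x xs (pvFirsts_induction h1 h2 (xs.filter (fun y => y.2.2 ≠ x.2.2)))
termination_by xs => xs.length
decreasing_by simpa using Nat.lt_succ_of_le (List.length_filter_le _ _)

theorem pvFirsts_sublist (xs : List (Int × Int × Int)) : (pvFirsts xs).Sublist xs := by
  induction xs using pvFirsts_induction with
  | h1 => simp [pvFirsts]
  | h2 x xs ih =>
    rw [pvFirsts]
    exact (ih.trans List.filter_sublist).cons₂ x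

theorem pvFirsts_mem {y : Int × Int × Int} {xs : List (Int × Int × Int)} (h : y ∈ pvFirsts xs) : y ∈ xs :=
  (pvFirsts_sublist xs).mem h

theorem pvFirsts_keys_ne (xs : List (Int × Int × Int)) :
    (pvFirsts xs).Pairwise (fun a b => a.2.2 ≠ b.2.2) := by
  induction xs using pvFirsts_induction with
  | h1 => simp [pvFirsts]
  | h2 x xs ih =>
    rw [pvFirsts]
    refine List.Pairwise.cons ?_ ih
    intro b hb
    have hbf : b.2.2 ≠ x.2.2 := by simpa using List.of_mem_filter (pvFirsts_mem hb)
    exact fun h => hbf h.symm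

theorem pvFirsts_nodup (xs : List (Int × Int × Int)) : (pvFirsts xs).Nodup :=
  (pvFirsts_keys_ne xs).imp (fun h => by intro he; exact h (by rw [he]))

theorem pvFind?_filter (xs : List (Int × Int × Int)) (k kx : Int) (h : k ≠ kx) :
    (xs.filter (fun z => z.2.2 ≠ kx)).find? (fun z => z.2.2 == k) = xs.find? (fun z => z.2.2 == k) := by
  induction xs with
  | nil => rfl
  | cons a xs ih =>
    by_cases ha : a.2.2 = kx
    · rw [List.filter_cons_of_neg (by simpa using ha), ih,
        List.find?_cons_of_neg (by simp [ha]; omega)]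
    · rw [List.filter_cons_of_pos (by simpa using ha)]
      by_cases hk : a.2.2 = k
      · rw [List.find?_cons_of_pos (by simp [hk]), List.find?_cons_of_pos (by simp [hk])]
      · rw [List.find?_cons_of_neg (by simp [hk]), List.find?_cons_of_neg (by simp [hk]), ih]

theorem pvMem_firsts_iff {y : Int × Int × Int} (xs : List (Int × Int × Int)) :
    y ∈ pvFirsts xs ↔ xs.find? (fun z => z.2.2 == y.2.2) = some y := by
  induction xs using pvFirsts_induction with
  | h1 => simp [pvFirsts]
  | h2 x xs ih =>
    rw [pvFirsts]
    by_cases hk : y.2.2 = x.2.2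
    · rw [List.find?_cons_of_pos (by simp [hk])]
      constructor
      · intro hmem
        rcases List.mem_cons.mp hmem with rfl | hmem
        · rfl
        · exact absurd (by simpa using List.of_mem_filter (pvFirsts_mem hmem)) (by simp [hk])
      · intro hf
        cases hf
        exact List.mem_cons_self
    · rw [List.find?_cons_of_neg (by simp; omega),
        ← pvFind?_filter xs y.2.2 x.2.2 hk, ← ih]
      constructor
      · intro hm
        rcases List.mem_cons.mp hm with rfl | hm
        · exact absurd rfl hk
        · exact hm
      · exact fun hm => List.mem_cons_of_mem _ hm

-- insertBy does not disturb the relative order of the elements a filter keeps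
theorem pvFilter_insertBy_neg (b : (Int × Int × Int) → (Int × Int × Int) → Bool)
    (p : (Int × Int × Int) → Bool) (x : Int × Int × Int) (ys : List (Int × Int × Int))
    (hx : p x = false) :
    (PySem.List.insertBy b x ys).filter p = ys.filter p := by
  induction ys with
  | nil => simp [PySem.List.insertBy, hx]
  | cons y ys ih =>
    by_cases hb : b x y
    · simp [PySem.List.insertBy, hb, List.filter_cons, hx]
    · simp only [PySem.List.insertBy, hb]
      simp [List.filter_cons, ih]

-- on a key-sorted list, insertBy puts x after every element with the same key
theorem pvFilter_insertBy_pos (x : Int × Int × Int) (ys : List (Int × Int × Int))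
    (hys : ys.Pairwise (fun a b => a.2.2 ≤ b.2.2)) :
    (PySem.List.insertBy (fun a b => decide (a.2.2 < b.2.2)) x ys).filter (fun z => z.2.2 == x.2.2)
      = ys.filter (fun z => z.2.2 == x.2.2) ++ [x] := by
  induction ys with
  | nil => simp [PySem.List.insertBy]
  | cons y ys ih =>
    by_cases hb : x.2.2 < y.2.2
    · have h1 : PySem.List.insertBy (fun a b => decide (a.2.2 < b.2.2)) x (y :: ys) = x :: y :: ys := by
        simp [PySem.List.insertBy, hb]
      have h2 : (y :: ys).filter (fun z => z.2.2 == x.2.2) = [] := by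
        rw [List.filter_eq_nil_iff]
        intro z hz
        rcases List.mem_cons.mp hz with rfl | hz
        · simp; omega
        · have := (List.pairwise_cons.mp hys).1 z hz
          simp; omega
      rw [h1, List.filter_cons_of_pos (by simp), h2]
      rfl
    · have h1 : PySem.List.insertBy (fun a b => decide (a.2.2 < b.2.2)) x (y :: ys)
          = y :: PySem.List.insertBy (fun a b => decide (a.2.2 < b.2.2)) x ys := by
        simp [PySem.List.insertBy, hb]
      rw [h1, List.filter_cons, List.filter_cons, ih hys.of_cons]
      by_cases hy : y.2.2 == x.2.2 <;> simp [hy]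

-- stability of PySem.List.sorted with respect to the key x.2.2
theorem pvSorted_filter_key (data : List (Int × Int × Int)) (k : Int) :
    (PySem.List.sorted data (fun x => x.2.2)).filter (fun z => z.2.2 == k)
      = data.filter (fun z => z.2.2 == k) := by
  induction data using List.reverseRecOn with
  | nil => simp [PySem.List.sorted_eq_foldl_insertBy]
  | append_singleton xs x ih =>
    rw [PySem.List.sorted_eq_foldl_insertBy, List.foldl_append, List.foldl_cons, List.foldl_nil,
      ← PySem.List.sorted_eq_foldl_insertBy, List.filter_append]
    by_cases hk : x.2.2 = k
    · have hpred : (fun z : Int × Int × Int => z.2.2 == k) = (fun z => z.2.2 == x.2.2) := by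
        funext z; simp [hk]
      rw [hpred, pvFilter_insertBy_pos x _ (PySem.List.sorted_pairwise xs (fun v => v.2.2)), ← hpred, ih]
      simp [hk]
    · rw [pvFilter_insertBy_neg _ _ _ _ (by simp [hk]), ih]
      simp [hk]

theorem pvFirsts_sorted_perm (data : List (Int × Int × Int)) :
    (pvFirsts (PySem.List.sorted data (fun x => x.2.2))).Perm (pvFirsts data) := by
  refine (List.perm_ext_iff_of_nodup (pvFirsts_nodup _) (pvFirsts_nodup _)).mpr ?_
  intro y
  rw [pvMem_firsts_iff, pvMem_firsts_iff, ← List.head?_filter, ← List.head?_filter,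
    pvSorted_filter_key data y.2.2]

-- ===== A-side: the dict loop collects exactly the first occurrence of each key =====
theorem pvFoldA_items (l : List (Int × Int × Int)) (d : PySem.Dict Int (Int × Int × Int)) :
    (l.foldl (fun dic x => if dic.contains x.2.2 then dic else dic.insert x.2.2 x) d).items
      = d.items ++ (pvFirsts (l.filter (fun y => !d.contains y.2.2))).map (fun x => (x.2.2, x)) := by
  induction l generalizing d with
  | nil => simp [pvFirsts]
  | cons x l ih =>
    by_cases hct : d.contains x.2.2
    · rw [List.foldl_cons, if_pos hct, ih, List.filter_cons_of_neg (by simp [hct])]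
    · rw [List.foldl_cons, if_neg hct, ih,
        PySem.Dict.items_insert_of_not_contains d x (by simpa using hct),
        List.filter_cons_of_pos (by simp [hct])]
      rw [pvFirsts]
      have hfil : l.filter (fun y => !(d.insert x.2.2 x).contains y.2.2)
          = (l.filter (fun y => !d.contains y.2.2)).filter (fun y => y.2.2 ≠ x.2.2) := by
        rw [List.filter_filter]
        apply List.filter_congr
        intro z _
        rw [PySem.Dict.contains_insert]
        by_cases hz : z.2.2 = x.2.2 <;> simp [hz]
      rw [hfil]
      simp

theorem pvA_eq (data : List (Int × Int × Int)) :
    sort_and_clean data = PySem.List.sorted (pvFirsts data) (fun x => x.2.2) := by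
  have hitems : (data.foldl (fun dic x => if dic.contains x.2.2 then dic else dic.insert x.2.2 x)
        PySem.Dict.empty).items = (pvFirsts data).map (fun x => (x.2.2, x)) := by
    rw [pvFoldA_items]
    simp [PySem.Dict.empty]
  set dic := data.foldl (fun dic x => if dic.contains x.2.2 then dic else dic.insert x.2.2 x)
    PySem.Dict.empty with hdic
  have hnd : dic.keys.Nodup := by
    show (dic.items.map (·.1)).Nodup
    rw [hitems, List.map_map]
    exact List.pairwise_map.mpr ((pvFirsts_keys_ne data).imp (fun h => h))
  have hvals : dic.keys.map (fun k => dic.getD k (0, 0, 0)) = pvFirsts data := by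
    rw [← PySem.Dict.values_eq_map_keys dic hnd (0, 0, 0)]
    show dic.items.map (·.2) = _
    rw [hitems, List.map_map]
    exact List.map_id _
  show PySem.List.sorted (dic.keys.map (fun k => dic.getD k (0, 0, 0))) (fun x => x.2.2) = _
  rw [hvals]

-- ===== B-side: the pass over the sorted list keeps the first of each key run =====
theorem pvGo_some (s : List (Int × Int × Int)) (acc : List (Int × Int × Int)) (k : Int)
    (hs : s.Pairwise (fun a b => a.2.2 ≤ b.2.2)) (hk : ∀ z ∈ s, k ≤ z.2.2) :
    (s.foldl (fun (acc : List (Int × Int × Int) × Option Int) x =>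
        match acc.2 with
        | none => (acc.1 ++ [x], some x.2.2)
        | some p => if x.2.2 ≠ p then (acc.1 ++ [x], some x.2.2) else acc) (acc, some k)).1
      = acc ++ pvFirsts (s.filter (fun z => z.2.2 ≠ k)) := by
  induction s generalizing acc k with
  | nil => simp [pvFirsts]
  | cons x s ih =>
    by_cases hx : x.2.2 = k
    · rw [List.foldl_cons]
      show (List.foldl _ (if x.2.2 ≠ k then (acc ++ [x], some x.2.2) else (acc, some k)) s).1 = _
      rw [if_neg (by simp [hx])]
      rw [ih acc k hs.of_cons (fun z hz => hk z (List.mem_cons_of_mem _ hz)),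
        List.filter_cons_of_neg (by simpa using hx)]
    · have hklt : k < x.2.2 := lt_of_le_of_ne (hk x List.mem_cons_self) (fun h => hx h.symm)
      rw [List.foldl_cons]
      show (List.foldl _ (if x.2.2 ≠ k then (acc ++ [x], some x.2.2) else (acc, some k)) s).1 = _
      rw [if_pos hx]
      rw [ih (acc ++ [x]) x.2.2 hs.of_cons (fun z hz => (List.pairwise_cons.mp hs).1 z hz),
        List.filter_cons_of_pos (by simpa using hx), pvFirsts]
      have hfil : (s.filter (fun z => z.2.2 ≠ k)).filter (fun z => z.2.2 ≠ x.2.2)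
          = s.filter (fun z => z.2.2 ≠ x.2.2) := by
        rw [List.filter_filter]
        apply List.filter_congr
        intro z hz
        have hzk : k < z.2.2 := lt_of_lt_of_le hklt ((List.pairwise_cons.mp hs).1 z hz)
        by_cases hzx : z.2.2 = x.2.2 <;> simp [hzx] ; omega
      rw [hfil]
      simp

theorem pvB_eq (data : List (Int × Int × Int)) :
    sort_and_clean_alt data = pvFirsts (PySem.List.sorted data (fun x => x.2.2)) := by
  have hs := PySem.List.sorted_pairwise data (fun x : Int × Int × Int => x.2.2)
  show (List.foldl _ ([], none) (PySem.List.sorted data (fun x => x.2.2))).1 = _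
  generalize PySem.List.sorted data (fun x => x.2.2) = s at hs ⊢
  cases s with
  | nil => simp [pvFirsts]
  | cons x s =>
    rw [List.foldl_cons]
    show (List.foldl _ ([] ++ [x], some x.2.2) s).1 = _
    rw [pvGo_some s ([] ++ [x]) x.2.2 hs.of_cons (fun z hz => (List.pairwise_cons.mp hs).1 z hz),
      pvFirsts]
    simp

-- ===== VERDICT =====
theorem sort_and_clean_spec : Claim_equal_sort_and_clean := by
  intro data _
  show sort_and_clean data = sort_and_clean_alt data
  rw [pvA_eq, pvB_eq]
  refine (PySem.List.sorted_eq_of_perm_of_pairwise_lt _ _ _ (pvFirsts_sorted_perm data) ?_)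
  have hsub := pvFirsts_sublist (PySem.List.sorted data (fun x => x.2.2))
  have hle := (PySem.List.sorted_pairwise data (fun x => x.2.2)).sublist hsub
  have hne := pvFirsts_keys_ne (PySem.List.sorted data (fun x => x.2.2))
  exact (hle.and hne).imp (fun h => lt_of_le_of_ne h.1 h.2)
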